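-- pv_equiv track=rewrite | github.com/emon51/myCodes | Intervals/Interviewbit: Disjoint Intervals.py | solve
-- ===== SOURCE A (Python) =====
-- def solve(A):
--
--     A.sort()
--     stack = []
--     for s, e in A:
--         if stack and s <= stack[-1][1]:
--             prev_s, prev_e = stack.pop()
--             stack.append([min(s, prev_s), min(e, prev_e)])
--         else:
--             stack.append([s, e])
--
--     return len(stack)
-- ===== SOURCE B (Python) =====
-- def solve(A):
--     # Same in-place A.sort() mutation as the original; the count is computed by a
--     # longest-chain dynamic program instead of the greedy merge-stack.
--     A.sort()
--     seen = []   # (end, dp) per processed interval, in order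
--     best = 0
--     for s, e in A:
--         m = 0
--         for pe, pd in seen:
--             if pe < s and pd > m:
--                 m = pd
--         seen.append((e, m + 1))
--         if m + 1 > best:
--             best = m + 1
--     return best
-- ===== Notes on version B (the rewrite author's own statement) =====
-- stated objective: alternative
-- what changed: Replaces the greedy merge-stack (pop/push of group minima) by a longest-chain dynamic program: for each interval in sorted order B computes the length of the longest sequence of mutually disjoint intervals ending there and returns the maximum; the proof shows each interval's DP value is exactly its group index in A's stack.
import Mathlib
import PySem

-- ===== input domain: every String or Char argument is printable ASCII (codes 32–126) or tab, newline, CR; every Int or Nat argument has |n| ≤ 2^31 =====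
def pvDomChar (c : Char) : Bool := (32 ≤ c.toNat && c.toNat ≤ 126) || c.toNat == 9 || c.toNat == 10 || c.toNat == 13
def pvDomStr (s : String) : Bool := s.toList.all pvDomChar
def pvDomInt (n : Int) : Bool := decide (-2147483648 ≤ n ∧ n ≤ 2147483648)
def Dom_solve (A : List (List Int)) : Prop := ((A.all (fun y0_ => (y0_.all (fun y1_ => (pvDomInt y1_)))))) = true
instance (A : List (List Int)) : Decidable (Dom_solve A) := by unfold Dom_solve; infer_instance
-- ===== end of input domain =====

-- B replaces A's greedy merge-stack by a longest-chain dynamic program over the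
-- sorted intervals; both call A.sort() (the same in-place mutation), so only the
-- return value is at issue.

-- ===== PORT A =====
-- A's stack, top first (Python appends/pops at the end; here the head is the top).
def solveStep (stack : List (Int × Int)) (x : List Int) : List (Int × Int) :=
  match x, stack with
  | [s, e], (ps, pe) :: tail =>
      if s ≤ pe then (min s ps, min e pe) :: tail else (s, e) :: (ps, pe) :: tail
  | [s, e], [] => [(s, e)]
  | _, st => st   -- unreachable under Pre_solve (Python raises on non-pairs)

def solve (A : List (List Int)) : Int :=
  (((PySem.List.sorted A (fun x => x) false).foldl solveStep []).length : Int)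

-- ===== PORT B =====
-- B's state: the list `seen` of (end, dp) per processed interval, and `best`.
def solveAltStep (st : List (Int × Int) × Int) (x : List Int) : List (Int × Int) × Int :=
  match x with
  | [s, e] =>
      let m := st.1.foldl (fun m p => if p.1 < s ∧ m < p.2 then p.2 else m) 0
      (st.1 ++ [(e, m + 1)], if st.2 < m + 1 then m + 1 else st.2)
  | _ => st   -- unreachable under Pre_solve

def solve_alt (A : List (List Int)) : Int :=
  ((PySem.List.sorted A (fun x => x) false).foldl solveAltStep ([], 0)).2

-- ===== PRECONDITION & SPEC =====
-- Pre_ excludes elements that are not 2-element lists: Python's 'for s, e in A' raises ValueError there (in both A and B).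
def Pre_solve (A : List (List Int)) : Prop := ∀ x ∈ A, x.length = 2
instance (A : List (List Int)) : Decidable (Pre_solve A) := by unfold Pre_solve; infer_instance

def pvWitness_solve : List (List Int) := [[1, 5], [2, 3], [6, 8]]

def Spec_solve (A : List (List Int)) (out : Int) : Prop := out = solve_alt A
instance (A : List (List Int)) (out : Int) : Decidable (Spec_solve A out) := by unfold Spec_solve; infer_instance

-- ===== CLAIM (what is proved, stated in full; the proofs are below) =====
def Claim_equal_solve : Prop := ∀ (A : List (List Int)), Dom_solve A → Pre_solve A → Spec_solve A (solve A)

-- ===== LEMMAS AND PROOFS =====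

-- The invariant tying A's stack (group minima, top first) to B's DP table:
-- best is the stack height; every seen interval's dp value names a group whose
-- min-end bounds its end from below; each group's min-end is realised by some
-- seen entry; group min-ends lie strictly below the next group's start; the top
-- group's start is at most `lb`, a lower bound for all future starts.
def StInv (St dps : List (Int × Int)) (best lb : Int) : Prop :=
  best = (St.length : Int)
  ∧ (St = [] → dps = [])
  ∧ (∀ p ∈ dps, ∃ j : ℕ, ∃ g : Int × Int, St.reverse[j]? = some g ∧ p.2 = (j : Int) + 1 ∧ g.2 ≤ p.1)
  ∧ (∀ j : ℕ, ∀ g : Int × Int, St.reverse[j]? = some g → (g.2, (j : Int) + 1) ∈ dps)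
  ∧ (∀ j : ℕ, ∀ g g' : Int × Int, St.reverse[j]? = some g → St.reverse[j+1]? = some g' → g.2 < g'.1)
  ∧ (∀ g : Int × Int, St.head? = some g → g.1 ≤ lb)

theorem foldmax_spec (s : Int) (dps : List (Int × Int)) : ∀ m0 : Int,
    m0 ≤ dps.foldl (fun m p => if p.1 < s ∧ m < p.2 then p.2 else m) m0
    ∧ (∀ p ∈ dps, p.1 < s → p.2 ≤ dps.foldl (fun m p => if p.1 < s ∧ m < p.2 then p.2 else m) m0)
    ∧ (dps.foldl (fun m p => if p.1 < s ∧ m < p.2 then p.2 else m) m0 = m0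
       ∨ ∃ p ∈ dps, p.1 < s ∧ p.2 = dps.foldl (fun m p => if p.1 < s ∧ m < p.2 then p.2 else m) m0) := by
  induction dps with
  | nil => intro m0; simp
  | cons q t ih =>
      intro m0
      obtain ⟨h1, h2, h3⟩ := ih (if q.1 < s ∧ m0 < q.2 then q.2 else m0)
      refine ⟨?_, ?_, ?_⟩
      · refine le_trans ?_ h1; split_ifs with h <;> omega
      · intro p hp hps
        rcases List.mem_cons.mp hp with rfl | hp
        · refine le_trans ?_ h1; split_ifs with h
          · exact le_refl _
          · rw [not_and_or, not_lt, not_lt] at h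
            rcases h with h | h
            · exact absurd hps (not_lt.mpr h)
            · exact h
        · exact h2 p hp hps
      · rcases h3 with h3 | ⟨p, hp, hps, hpe⟩
        · by_cases h : q.1 < s ∧ m0 < q.2
          · right; exact ⟨q, by simp, h.1, by rw [List.foldl_cons, h3]; simp [h]⟩
          · left; rw [List.foldl_cons, h3]; simp [h]
        · right; exact ⟨p, by simp [hp], hps, hpe⟩

-- last-position lookup in (h :: t).reverse

-- last-position lookup in (h :: t).reverse
theorem rev_last (h : Int × Int) (t : List (Int × Int)) : (h :: t).reverse[t.length]? = some h := by
  rw [List.reverse_cons, List.getElem?_append_right (by simp)]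
  simp

theorem rev_lt (h : Int × Int) (t : List (Int × Int)) (j : ℕ) (hj : j < t.length) :
    (h :: t).reverse[j]? = t.reverse[j]? := by
  rw [List.reverse_cons, List.getElem?_append_left (by simp [hj])]

theorem step_inv (St dps : List (Int × Int)) (best lb s e : Int)
    (hinv : StInv St dps best lb) (hlb : lb ≤ s) :
    StInv (solveStep St [s, e]) ((solveAltStep (dps, best) [s, e]).1) ((solveAltStep (dps, best) [s, e]).2) s := by
  obtain ⟨hbest, hemp, hent, hach, hcross, hhead⟩ := hinv
  obtain ⟨hm0, hub, hex⟩ := foldmax_spec s dps 0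
  set m := dps.foldl (fun m p => if p.1 < s ∧ m < p.2 then p.2 else m) 0 with hmdef
  have hstep : (solveAltStep (dps, best) [s, e]) = (dps ++ [(e, m + 1)], if best < m + 1 then m + 1 else best) := rfl
  rw [hstep]
  match St, hemp, hbest, hent, hach, hcross, hhead with
  | [], hemp, hbest, hent, hach, hcross, hhead =>
      have hd : dps = [] := hemp rfl
      subst hd
      have hm : m = 0 := by rw [hmdef]; rfl
      have hb : best = 0 := by simpa using hbest
      subst hb; rw [hm]
      show StInv [(s,e)] [(e, 0+1)] (if (0:Int) < 0+1 then 0+1 else 0) s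
      rw [if_pos (by omega)]
      refine ⟨by simp, by simp, ?_, ?_, ?_, ?_⟩
      · intro p hp
        rcases List.mem_singleton.mp hp with rfl
        exact ⟨0, (s, e), by simp, by simp, by simp⟩
      · intro j g hg
        match j, hg with
        | 0, hg =>
            simp at hg; subst hg; simp
      · intro j g g' hg hg'
        rw [show ([(s,e)] : List (Int×Int)).reverse = [(s,e)] from rfl] at hg'
        rw [List.getElem?_eq_none (by simp)] at hg'
        exact absurd hg' (by simp)
      · intro g hg; simp at hg; subst hg; simp
  | (ps, pe) :: tail, hemp, hbest, hent, hach, hcross, hhead =>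
      have hps : ps ≤ lb := hhead (ps, pe) rfl
      have hlen : best = (tail.length : Int) + 1 := by simpa [Nat.cast_add] using hbest
      have hrevlast : ((ps,pe)::tail).reverse[tail.length]? = some (ps,pe) := rev_last _ _
      by_cases hcase : s ≤ pe
      · -- merge: m = tail.length, the stack top's end shrinks, best is unchanged
        have hupper : m ≤ (tail.length : Int) := by
          rcases hex with h | ⟨p, hp, hps', hpe'⟩
          · omega
          · obtain ⟨j, g, hg, hj, hge⟩ := hent p hp
            have hjlt : j < tail.length + 1 := by
              have := (List.getElem?_eq_some_iff.mp hg).1; simpa using this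
            by_cases hj2 : j = tail.length
            · subst hj2
              have hgg : g = (ps, pe) := by
                have := hg.symm.trans hrevlast; exact Option.some.inj this
              rw [hgg] at hge; simp at hge; omega
            · have : j < tail.length := by omega
              omega
        have hlower : (tail.length : Int) ≤ m := by
          match tail, hcross, hach with
          | [], _, _ => simpa using hm0
          | q :: ts, hcross, hach =>
              have hg0 : ((ps,pe)::(q::ts)).reverse[ts.length]? = some q := by
                rw [rev_lt _ _ _ (by simp)]; exact rev_last q ts
              have hq2 : q.2 < ps := by
                refine hcross ts.length q (ps,pe) hg0 ?_
                simp
              have hmem : (q.2, (ts.length : Int) + 1) ∈ dps := hach ts.length q hg0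
              have := hub (q.2, (ts.length : Int) + 1) hmem (by simp; omega)
              simp at this ⊢; omega
        have hm : m = (tail.length : Int) := le_antisymm hupper hlower
        have hmin : min s ps = ps := min_eq_right (le_trans hps hlb)
        have hsolve : solveStep ((ps,pe)::tail) [s,e] = (ps, min e pe) :: tail := by
          simp [solveStep, if_pos hcase, hmin]
        have hbest' : (if best < m + 1 then m + 1 else best) = best := by
          rw [if_neg (by omega)]
        rw [hsolve, hbest']
        have hrev'last : ((ps, min e pe)::tail).reverse[tail.length]? = some (ps, min e pe) :=
          rev_last _ _
        refine ⟨by simpa using hlen, by simp, ?_, ?_, ?_, ?_⟩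
        · intro p hp
          rcases List.mem_append.mp hp with hp | hp
          · obtain ⟨j, g, hg, hj, hge⟩ := hent p hp
            have hjlt : j < tail.length + 1 := by
              have := (List.getElem?_eq_some_iff.mp hg).1; simpa using this
            by_cases hj2 : j = tail.length
            · subst hj2
              have hgg : g = (ps, pe) := Option.some.inj (hg.symm.trans hrevlast)
              refine ⟨tail.length, (ps, min e pe), hrev'last, hj, ?_⟩
              have : pe ≤ p.1 := by rw [hgg] at hge; exact hge
              simp; omega
            · have hjl : j < tail.length := by omega
              refine ⟨j, g, ?_, hj, hge⟩
              rw [rev_lt _ _ _ hjl]; rw [rev_lt _ _ _ hjl] at hg; exact hg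
          · rcases List.mem_singleton.mp hp with rfl
            refine ⟨tail.length, (ps, min e pe), hrev'last, by simp [hm], by simp⟩
        · intro j g hg
          have hjlt : j < tail.length + 1 := by
            have := (List.getElem?_eq_some_iff.mp hg).1; simpa using this
          by_cases hj2 : j = tail.length
          · subst hj2
            have hgg : g = (ps, min e pe) := Option.some.inj (hg.symm.trans hrev'last)
            subst hgg
            rcases le_total pe e with hpe2 | hpe2
            · have : (min e pe) = pe := min_eq_right hpe2
              rw [this]
              exact List.mem_append.mpr (Or.inl (hach tail.length (ps,pe) hrevlast))
            · have : (min e pe) = e := min_eq_left hpe2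
              rw [this]
              refine List.mem_append.mpr (Or.inr ?_)
              simp [hm]
          · have hjl : j < tail.length := by omega
            rw [rev_lt _ _ _ hjl] at hg
            have : ((ps,pe)::tail).reverse[j]? = some g := by rw [rev_lt _ _ _ hjl]; exact hg
            exact List.mem_append.mpr (Or.inl (hach j g this))
        · intro j g g' hg hg'
          have hjlt : j + 1 < tail.length + 1 := by
            have := (List.getElem?_eq_some_iff.mp hg').1; simpa using this
          have hjl : j < tail.length := by omega
          have hgSt : ((ps,pe)::tail).reverse[j]? = some g := by
            rw [rev_lt _ _ _ hjl]; rw [rev_lt _ _ _ hjl] at hg; exact hg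
          by_cases hj2 : j + 1 = tail.length
          · have hgg' : g' = (ps, min e pe) := by
              rw [← hj2] at hrev'last; exact Option.some.inj (hg'.symm.trans hrev'last)
            have : ((ps,pe)::tail).reverse[j+1]? = some (ps, pe) := by
              rw [← hj2] at hrevlast; exact hrevlast
            have := hcross j g (ps,pe) hgSt this
            rw [hgg']; simpa using this
          · have hjl' : j + 1 < tail.length := by omega
            rw [rev_lt _ _ _ hjl'] at hg'
            have : ((ps,pe)::tail).reverse[j+1]? = some g' := by rw [rev_lt _ _ _ hjl']; exact hg'
            exact hcross j g g' hgSt this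
        · intro g hg
          simp at hg; subst hg; simp; omega
      · -- push: m = tail.length + 1, a new group is opened, best grows by one
        have hupper : m ≤ (tail.length : Int) + 1 := by
          rcases hex with h | ⟨p, hp, hps', hpe'⟩
          · omega
          · obtain ⟨j, g, hg, hj, hge⟩ := hent p hp
            have hjlt : j < tail.length + 1 := by
              have := (List.getElem?_eq_some_iff.mp hg).1; simpa using this
            omega
        have hlower : (tail.length : Int) + 1 ≤ m := by
          have hmem : (pe, (tail.length : Int) + 1) ∈ dps := hach tail.length (ps,pe) hrevlast
          have := hub (pe, (tail.length : Int) + 1) hmem (by simp; omega)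
          simp at this ⊢; omega
        have hm : m = (tail.length : Int) + 1 := le_antisymm hupper hlower
        have hsolve : solveStep ((ps,pe)::tail) [s,e] = (s, e) :: (ps,pe) :: tail := by
          simp [solveStep, if_neg hcase]
        have hbest' : (if best < m + 1 then m + 1 else best) = m + 1 := by
          rw [if_pos (by omega)]
        rw [hsolve, hbest']
        have hrev'last : ((s,e)::(ps,pe)::tail).reverse[tail.length+1]? = some (s, e) := by
          simp
        have hrev'lt : ∀ j : ℕ, j < tail.length + 1 →
            ((s,e)::(ps,pe)::tail).reverse[j]? = ((ps,pe)::tail).reverse[j]? := by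
          intro j hj; exact rev_lt _ _ _ (by simpa using hj)
        refine ⟨by simp; omega, by simp, ?_, ?_, ?_, ?_⟩
        · intro p hp
          rcases List.mem_append.mp hp with hp | hp
          · obtain ⟨j, g, hg, hj, hge⟩ := hent p hp
            have hjlt : j < tail.length + 1 := by
              have := (List.getElem?_eq_some_iff.mp hg).1; simpa using this
            refine ⟨j, g, ?_, hj, hge⟩
            rw [hrev'lt j hjlt]; exact hg
          · rcases List.mem_singleton.mp hp with rfl
            exact ⟨tail.length + 1, (s, e), hrev'last, by simp [hm], by simp⟩
        · intro j g hg
          have hjlt : j < tail.length + 2 := by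
            have := (List.getElem?_eq_some_iff.mp hg).1; simpa using this
          by_cases hj2 : j = tail.length + 1
          · subst hj2
            have hgg : g = (s, e) := Option.some.inj (hg.symm.trans hrev'last)
            subst hgg
            refine List.mem_append.mpr (Or.inr ?_)
            simp [hm]
          · have hjl : j < tail.length + 1 := by omega
            rw [hrev'lt j hjl] at hg
            exact List.mem_append.mpr (Or.inl (hach j g hg))
        · intro j g g' hg hg'
          have hjlt : j + 1 < tail.length + 2 := by
            have := (List.getElem?_eq_some_iff.mp hg').1; simpa using this
          have hgSt : ((ps,pe)::tail).reverse[j]? = some g := by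
            rw [← hrev'lt j (by omega)]; exact hg
          by_cases hj2 : j + 1 = tail.length + 1
          · have hgg' : g' = (s, e) := by
              rw [← hj2] at hrev'last; exact Option.some.inj (hg'.symm.trans hrev'last)
            have hj3 : j = tail.length := by omega
            subst hj3
            have hgg : g = (ps, pe) := Option.some.inj (hgSt.symm.trans hrevlast)
            rw [hgg, hgg']; simp; omega
          · have hjl' : j + 1 < tail.length + 1 := by omega
            rw [hrev'lt (j+1) hjl'] at hg'
            exact hcross j g g' hgSt hg'
        · intro g hg
          simp at hg; subst hg; simp

theorem main_loop (L : List (List Int)) : ∀ (St dps : List (Int × Int)) (best lb : Int),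
    (∀ x ∈ L, x.length = 2) →
    L.Pairwise (fun x y => x.headD 0 ≤ y.headD 0) →
    (∀ x ∈ L, lb ≤ x.headD 0) →
    StInv St dps best lb →
    (((L.foldl solveStep St).length : Int)) = (L.foldl solveAltStep (dps, best)).2 := by
  induction L with
  | nil =>
      intro St dps best lb _ _ _ hinv
      exact (hinv.1).symm
  | cons x L ih =>
      intro St dps best lb hlen hmono hlb hinv
      obtain ⟨s, e, rfl⟩ : ∃ s e, x = [s, e] := by
        have h2 := hlen x (by simp)
        match x, h2 with
        | [s, e], _ => exact ⟨s, e, rfl⟩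
      have hs : lb ≤ s := by simpa using hlb [s, e] (by simp)
      have hinv' := step_inv St dps best lb s e hinv hs
      rw [List.foldl_cons, List.foldl_cons]
      have hpair := (List.pairwise_cons.mp hmono).1
      have hst : (solveAltStep (dps, best) [s, e]) = ((solveAltStep (dps, best) [s, e]).1, (solveAltStep (dps, best) [s, e]).2) := rfl
      rw [hst]
      exact ih _ _ _ s (fun y hy => hlen y (by simp [hy]))
        (List.pairwise_cons.mp hmono).2
        (fun y hy => by simpa using hpair y hy) hinv' 

-- ===== VERDICT (by name: the statement is the Claim_ definition above) =====
-- Lex order on 2-element Int lists bounds the heads.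
theorem lex_head (s1 e1 s2 e2 : Int) (h : ([s1, e1] : List Int) ≤ [s2, e2]) : s1 ≤ s2 := by
  by_contra hc
  have hlt : ([s2, e2] : List Int) < [s1, e1] := List.Lex.rel (by omega)
  exact absurd hlt (not_lt.mpr h)

-- ===== VERDICT (by name: the statement is the Claim_ definition above) =====
theorem solve_spec : Claim_equal_solve := by
  intro A _ hpre
  unfold Spec_solve solve solve_alt
  set S := PySem.List.sorted A (fun x => x) false with hS
  have hlenS : ∀ x ∈ S, x.length = 2 := fun x hx => hpre x ((PySem.List.mem_sorted A (fun x => x) false x).mp hx)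
  have hpw : S.Pairwise (fun a b => (a : List Int) ≤ b) := by
    rw [hS]
    have e : @PySem.List.sorted (List ℤ) (List ℤ) List.instLT (fun a b => a.decidableLT b) A (fun x => x) false
        = @PySem.List.sorted _ _ List.instLinearOrder.toLT LinearOrder.toDecidableLT A (fun x => x) false := by
      congr 1
    rw [e]
    exact PySem.List.sorted_pairwise A (fun x => (x : List Int))
  have hmono : S.Pairwise (fun x y => x.headD 0 ≤ y.headD 0) := by
    refine List.Pairwise.imp_of_mem ?_ hpw
    intro a b ha hb hab
    obtain ⟨s1, e1, h1⟩ : ∃ s e, a = [s, e] := by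
      have := hlenS a ha
      match a, this with | [s, e], _ => exact ⟨s, e, rfl⟩
    obtain ⟨s2, e2, h2⟩ : ∃ s e, b = [s, e] := by
      have := hlenS b hb
      match b, this with | [s, e], _ => exact ⟨s, e, rfl⟩
    subst h1; subst h2
    simpa using lex_head s1 e1 s2 e2 hab
  match hS2 : S with
  | [] => rfl
  | h :: t =>
      have hinv0 : StInv [] [] 0 (h.headD 0) := by
        refine ⟨rfl, fun _ => rfl, ?_, ?_, ?_, ?_⟩ <;> simp
      have hlb : ∀ x ∈ h :: t, h.headD 0 ≤ x.headD 0 := by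
        intro x hx
        rcases List.mem_cons.mp hx with rfl | hx
        · exact le_refl _
        · exact (List.pairwise_cons.mp (hS2 ▸ hmono)).1 x hx
      exact main_loop (h :: t) [] [] 0 (h.headD 0) (hS2 ▸ hlenS) (hS2 ▸ hmono) hlb hinv0
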